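-- pv_equiv track=rewrite | github.com/jerichosy/Abet-Discord-bot | cogs/Fun.py | check_password_criteria
-- ===== SOURCE A (Python) =====
-- import string
--
-- def check_password_criteria(text):
--     has_upper = any(c.isupper() for c in text)
--     has_lower = any(c.islower() for c in text)
--     has_digit = any(c.isdigit() for c in text)
--     has_special = any(c in string.punctuation for c in text)
--     is_long_enough = len(text) >= 10
--     no_spaces = " " not in text
--     return (
--         has_upper,
--         has_lower,
--         has_digit,
--         has_special,
--         is_long_enough,
--         no_spaces,
--         all([has_upper, has_lower, has_digit, has_special, is_long_enough, no_spaces]),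
--     )
-- ===== SOURCE B (Python) =====
-- import string
--
-- def check_password_criteria(text):
--     has_upper = has_lower = has_digit = has_special = False
--     for c in text:
--         if c.isupper():
--             has_upper = True
--         elif c.islower():
--             has_lower = True
--         elif c.isdigit():
--             has_digit = True
--         elif c in string.punctuation:
--             has_special = True
--     is_long_enough = len(text) >= 10
--     no_spaces = " " not in text
--     ok = (has_upper and has_lower and has_digit and has_special
--           and is_long_enough and no_spaces)
--     return (has_upper, has_lower, has_digit, has_special,
--             is_long_enough, no_spaces, ok)
-- ===== Notes on version B (the rewrite author's own statement) =====
-- stated objective: faster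
-- what changed: Replaces A's four independent any(...) full scans of the string by a single for-loop over the characters that maintains the four flags (if/elif chain), with the length and space checks done once after the loop.
import Mathlib
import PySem

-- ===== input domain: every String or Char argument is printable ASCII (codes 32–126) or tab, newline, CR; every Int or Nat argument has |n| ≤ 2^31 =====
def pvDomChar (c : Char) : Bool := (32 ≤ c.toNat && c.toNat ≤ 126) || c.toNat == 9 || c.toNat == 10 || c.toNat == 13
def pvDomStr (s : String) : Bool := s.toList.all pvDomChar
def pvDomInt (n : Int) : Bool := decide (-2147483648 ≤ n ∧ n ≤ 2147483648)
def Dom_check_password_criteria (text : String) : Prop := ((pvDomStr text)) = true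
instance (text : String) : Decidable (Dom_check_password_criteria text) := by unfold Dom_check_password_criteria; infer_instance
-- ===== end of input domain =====

-- B replaces A's four independent full scans by one character loop maintaining the four flags (alternative decomposition, same cost class).

-- string.punctuation
def pvPunct : List Char := "!\"#$%&'()*+,-./:;<=>?@[\\]^_`{|}~".toList

-- ===== PORT A =====
def check_password_criteria (text : String) : Bool × Bool × Bool × Bool × Bool × Bool × Bool :=
  let cs := text.toList
  let has_upper := cs.any PySem.Chars.isupper
  let has_lower := cs.any PySem.Chars.islower
  let has_digit := cs.any PySem.Chars.isdigit
  let has_special := cs.any (fun c => PySem.Chars.isIn [c] pvPunct)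
  let is_long_enough : Bool := decide ((PySem.Chars.len cs) ≥ 10)
  let no_spaces := ! PySem.Chars.isIn [' '] cs
  (has_upper, has_lower, has_digit, has_special, is_long_enough, no_spaces,
   has_upper && has_lower && has_digit && has_special && is_long_enough && no_spaces)

-- ===== PORT B =====
-- B's loop: fold over the characters, updating the four flags with A's-free if/elif chain
def pvFlagsLoop : List Char → (Bool × Bool × Bool × Bool) → (Bool × Bool × Bool × Bool)
  | [], st => st
  | c :: rest, (u, l, d, s) =>
    pvFlagsLoop rest
      (if PySem.Chars.isupper c then (true, l, d, s)
       else if PySem.Chars.islower c then (u, true, d, s)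
       else if PySem.Chars.isdigit c then (u, l, true, s)
       else if PySem.Chars.isIn [c] pvPunct then (u, l, d, true)
       else (u, l, d, s))

def check_password_criteria_alt (text : String) : Bool × Bool × Bool × Bool × Bool × Bool × Bool :=
  let cs := text.toList
  let (has_upper, has_lower, has_digit, has_special) := pvFlagsLoop cs (false, false, false, false)
  let is_long_enough : Bool := decide ((PySem.Chars.len cs) ≥ 10)
  let no_spaces := ! PySem.Chars.isIn [' '] cs
  (has_upper, has_lower, has_digit, has_special, is_long_enough, no_spaces,
   has_upper && has_lower && has_digit && has_special && is_long_enough && no_spaces)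

-- ===== PRECONDITION & SPEC =====
def Spec_check_password_criteria (text : String) (out : Bool × Bool × Bool × Bool × Bool × Bool × Bool) : Prop := out = check_password_criteria_alt text
instance (text : String) (out : Bool × Bool × Bool × Bool × Bool × Bool × Bool) : Decidable (Spec_check_password_criteria text out) := by unfold Spec_check_password_criteria; infer_instance

-- ===== CLAIM (what is proved, stated in full; the proofs are below) =====
def Claim_equal_check_password_criteria : Prop := ∀ (text : String), Dom_check_password_criteria text → Spec_check_password_criteria text (check_password_criteria text)

-- ===== LEMMAS AND PROOFS =====

theorem pvMem_of_isIn_singleton (c : Char) (s : List Char) (h : PySem.Chars.isIn [c] s = true) : c ∈ s :=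
  ((PySem.Chars.isIn_iff_infix _ _).mp h).subset (by simp)

set_option maxRecDepth 4000 in
theorem pvPunct_not_alnum : pvPunct.all (fun c => !PySem.Chars.isupper c && !PySem.Chars.islower c && !PySem.Chars.isdigit c) = true := by decide

-- the four character classes are pairwise disjoint
theorem pvUpper_cases (c : Char) (hu : PySem.Chars.isupper c = true) :
    PySem.Chars.islower c = false ∧ PySem.Chars.isdigit c = false ∧ PySem.Chars.isIn [c] pvPunct = false := by
  have e1 : 'A'.val.toNat = 65 := rfl
  have e2 : 'Z'.val.toNat = 90 := rfl
  refine ⟨?_, ?_, ?_⟩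
  · simp only [PySem.Chars.isupper, PySem.Chars.islower, Bool.and_eq_true, decide_eq_true_eq, Char.le_def, UInt32.le_iff_toNat_le] at *
    simp only [Bool.and_eq_false_iff, decide_eq_false_iff_not]
    have e3 : 'a'.val.toNat = 97 := rfl
    omega
  · simp only [PySem.Chars.isupper, PySem.Chars.isdigit, Bool.and_eq_true, decide_eq_true_eq, Char.le_def, UInt32.le_iff_toNat_le] at *
    simp only [Bool.and_eq_false_iff, decide_eq_false_iff_not]
    have e3 : '9'.val.toNat = 57 := rfl
    omega
  · by_contra h
    rw [Bool.not_eq_false] at h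
    have hm := List.all_eq_true.mp pvPunct_not_alnum c (pvMem_of_isIn_singleton c pvPunct h)
    simp [hu] at hm

theorem pvLower_cases (c : Char) (hl : PySem.Chars.islower c = true) :
    PySem.Chars.isdigit c = false ∧ PySem.Chars.isIn [c] pvPunct = false := by
  refine ⟨?_, ?_⟩
  · simp only [PySem.Chars.islower, PySem.Chars.isdigit, Bool.and_eq_true, decide_eq_true_eq, Char.le_def, UInt32.le_iff_toNat_le] at *
    simp only [Bool.and_eq_false_iff, decide_eq_false_iff_not]
    have e1 : 'a'.val.toNat = 97 := rfl
    have e2 : '9'.val.toNat = 57 := rfl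
    omega
  · by_contra h
    rw [Bool.not_eq_false] at h
    have hm := List.all_eq_true.mp pvPunct_not_alnum c (pvMem_of_isIn_singleton c pvPunct h)
    simp [hl] at hm

theorem pvDigit_cases (c : Char) (hd : PySem.Chars.isdigit c = true) :
    PySem.Chars.isIn [c] pvPunct = false := by
  by_contra h
  rw [Bool.not_eq_false] at h
  have hm := List.all_eq_true.mp pvPunct_not_alnum c (pvMem_of_isIn_singleton c pvPunct h)
  simp [hd] at hm

-- the elif chain sets each flag iff its class matches (the classes are disjoint)
theorem pvFlagsLoop_spec (cs : List Char) (u l d s : Bool) :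
    pvFlagsLoop cs (u, l, d, s) =
      (u || cs.any PySem.Chars.isupper,
       l || cs.any PySem.Chars.islower,
       d || cs.any PySem.Chars.isdigit,
       s || cs.any (fun c => PySem.Chars.isIn [c] pvPunct)) := by
  induction cs generalizing u l d s with
  | nil => simp [pvFlagsLoop]
  | cons c rest ih =>
    simp only [pvFlagsLoop, List.any_cons]
    by_cases hu : PySem.Chars.isupper c
    · obtain ⟨hl, hd, hs⟩ := pvUpper_cases c hu
      simp [hu, hl, hd, hs, ih]
    · by_cases hl : PySem.Chars.islower c
      · obtain ⟨hd, hs⟩ := pvLower_cases c hl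
        simp [hu, hl, hd, hs, ih]
      · by_cases hd : PySem.Chars.isdigit c
        · have hs := pvDigit_cases c hd
          simp [hu, hl, hd, hs, ih]
        · by_cases hs : PySem.Chars.isIn [c] pvPunct
          · simp [hu, hl, hd, hs, ih]
          · simp [hu, hl, hd, hs, ih]

-- ===== VERDICT (by name: the statement is the Claim_ definition above) =====
theorem check_password_criteria_spec : Claim_equal_check_password_criteria := by
  intro text _
  unfold Spec_check_password_criteria check_password_criteria check_password_criteria_alt
  simp [pvFlagsLoop_spec]
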